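-- pv_equiv track=rewrite | github.com/derrickturk/advent-of-code | 2019/04/passwd.py | valid1
-- ===== SOURCE A (Python) =====
-- def valid1(passwd):
--     passwd_digits = str(passwd)
--     seen_dup = False
--     for i in range(1, len(passwd_digits)):
--         if passwd_digits[i] < passwd_digits[i - 1]:
--             return False
--         elif passwd_digits[i] == passwd_digits[i - 1]:
--             seen_dup = True
--     return seen_dup
-- ===== SOURCE B (Python) =====
-- def valid1(passwd):
--     s = str(passwd)
--     return s == ''.join(sorted(s)) and any(a == b for a, b in zip(s, s[1:]))
-- ===== Notes on version B (the rewrite author's own statement) =====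
-- stated objective: simpler
-- what changed: Replaces the manual index loop with early return and a dup flag by a sort-and-compare for monotonicity plus a pairwise zip scan for the adjacent duplicate.
import Mathlib
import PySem

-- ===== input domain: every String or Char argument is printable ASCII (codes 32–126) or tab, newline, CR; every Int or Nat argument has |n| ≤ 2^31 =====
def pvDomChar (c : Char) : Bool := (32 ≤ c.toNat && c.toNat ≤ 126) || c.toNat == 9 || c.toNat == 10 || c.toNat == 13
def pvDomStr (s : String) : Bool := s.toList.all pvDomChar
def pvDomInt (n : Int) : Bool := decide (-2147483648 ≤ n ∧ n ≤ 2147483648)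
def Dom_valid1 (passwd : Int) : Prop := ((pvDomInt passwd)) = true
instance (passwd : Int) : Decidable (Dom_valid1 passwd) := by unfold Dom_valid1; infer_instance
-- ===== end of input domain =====

-- B replaces A's single manual comparison loop (early return + dup flag) by
-- sort-and-compare for monotonicity plus a pairwise zip scan for the duplicate (simpler).

-- ===== PORT A =====
-- the 'for i in range(1, len(passwd_digits))' loop with early 'return False';
-- indices from pyRange 1 len are always in range, so pyGetD's default is never used
def valid1Loop (cs : List Char) : List Int → Bool → Bool
  | [], seen => seen
  | i :: rest, seen =>
    if PySem.List.pyGetD cs i ' ' < PySem.List.pyGetD cs (i - 1) ' ' then false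
    else if PySem.List.pyGetD cs i ' ' == PySem.List.pyGetD cs (i - 1) ' ' then
      valid1Loop cs rest true
    else valid1Loop cs rest seen

def valid1 (passwd : Int) : Bool :=
  let passwdDigits := PySem.Int.toChars passwd
  valid1Loop passwdDigits (PySem.List.pyRange 1 passwdDigits.length 1) false

-- ===== PORT B =====
def valid1_alt (passwd : Int) : Bool :=
  let s := PySem.Int.toChars passwd
  (s == PySem.List.sorted s (fun c => c) false) &&
    ((s.zip (PySem.List.slice s (some 1) none)).any (fun p => p.1 == p.2))

-- ===== PRECONDITION & SPEC =====
def Spec_valid1 (passwd : Int) (out : Bool) : Prop := out = valid1_alt passwd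
instance (passwd : Int) (out : Bool) : Decidable (Spec_valid1 passwd out) := by unfold Spec_valid1; infer_instance

-- ===== CLAIM (what is proved, stated in full; the proofs are below) =====
def Claim_equal_valid1 : Prop := ∀ (passwd : Int), Dom_valid1 passwd → Spec_valid1 passwd (valid1 passwd)

-- ===== LEMMAS AND PROOFS =====

-- A's loop over adjacent pairs, list-structural form
def pairLoop : List Char → Bool → Bool
  | c1 :: c2 :: rest, seen =>
    if c2 < c1 then false
    else if c2 == c1 then pairLoop (c2 :: rest) true
    else pairLoop (c2 :: rest) seen
  | _, seen => seen

def adjAny (cs : List Char) : Bool := (cs.zip cs.tail).any (fun p => p.1 == p.2)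

theorem valid1Loop_eq_pairLoop_aux (cs : List Char) :
    ∀ (n k : Nat) (seen : Bool), cs.length - k = n →
      valid1Loop cs (PySem.List.pyRange ((k : Int) + 1) cs.length 1) seen
        = pairLoop (cs.drop k) seen := by
  intro n
  induction n with
  | zero =>
    intro k seen hn
    have hle : cs.length ≤ k := by omega
    rw [PySem.List.pyRange_one_eq_nil (by exact_mod_cast by omega : (cs.length : Int) ≤ (k : Int) + 1)]
    rw [List.drop_eq_nil_of_le hle]
    simp [valid1Loop, pairLoop]
  | succ n ih =>
    intro k seen hn
    by_cases hlt : k + 1 < cs.length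
    · rw [PySem.List.pyRange_one_cons (by exact_mod_cast hlt : (k : Int) + 1 < (cs.length : Int))]
      have hk : k < cs.length := by omega
      rw [List.drop_eq_getElem_cons hk, List.drop_eq_getElem_cons hlt]
      have h1 : PySem.List.pyGetD cs ((k : Int) + 1) ' ' = cs[k + 1] := by
        rw [show ((k : Int) + 1) = ((k + 1 : Nat) : Int) by push_cast; ring,
          PySem.List.pyGetD_natCast]
        exact List.getD_eq_getElem cs ' ' hlt
      have h2 : PySem.List.pyGetD cs ((k : Int) + 1 - 1) ' ' = cs[k] := by
        rw [show ((k : Int) + 1 - 1) = ((k : Nat) : Int) by ring, PySem.List.pyGetD_natCast]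
        exact List.getD_eq_getElem cs ' ' hk
      have hrec : ((k : Int) + 1 + 1) = ((k + 1 : Nat) : Int) + 1 := by push_cast; ring
      simp only [valid1Loop, pairLoop, h1, h2, hrec]
      rw [← List.drop_eq_getElem_cons hlt]
      split_ifs <;> first
        | rfl
        | exact ih (k + 1) true (by omega)
        | exact ih (k + 1) seen (by omega)
    · rw [PySem.List.pyRange_one_eq_nil (by exact_mod_cast by omega : (cs.length : Int) ≤ (k : Int) + 1)]
      have hlen : (cs.drop k).length ≤ 1 := by simp; omega
      match h : cs.drop k with
      | [] => simp [valid1Loop, pairLoop]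
      | [c] => simp [valid1Loop, pairLoop]
      | a :: b :: t => rw [h] at hlen; simp at hlen

theorem valid1Loop_eq_pairLoop (cs : List Char) (k : Nat) (seen : Bool) :
    valid1Loop cs (PySem.List.pyRange ((k : Int) + 1) cs.length 1) seen
      = pairLoop (cs.drop k) seen :=
  valid1Loop_eq_pairLoop_aux cs (cs.length - k) k seen rfl

theorem pairLoop_eq (cs : List Char) :
    ∀ seen, pairLoop cs seen = (decide (List.IsChain (· ≤ ·) cs) && (seen || adjAny cs)) := by
  induction cs with
  | nil => intro seen; simp [pairLoop, adjAny]
  | cons c1 t ih =>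
    cases t with
    | nil => intro seen; simp [pairLoop, adjAny]
    | cons c2 rest =>
      intro seen
      simp only [pairLoop, adjAny, List.tail_cons, List.zip_cons_cons, List.any_cons]
      rw [ih true, ih seen]
      by_cases hlt : c2 < c1
      · simp [hlt, List.isChain_cons_cons, not_le.mpr hlt]
      · have hle : c1 ≤ c2 := le_of_not_gt hlt
        by_cases heq : c2 = c1
        · subst heq
          simp [adjAny, List.isChain_cons_cons]
        · have hne : (c1 == c2) = false := beq_false_of_ne (Ne.symm heq)
          simp [hlt, heq, adjAny, List.isChain_cons_cons, hle, hne]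

theorem sorted_eq_iff_chain (cs : List Char) :
    (cs == PySem.List.sorted cs (fun c => c) false) = decide (List.IsChain (· ≤ ·) cs) := by
  by_cases h : List.IsChain (· ≤ ·) cs
  · rw [PySem.List.sorted_eq_self_of_pairwise cs (fun c => c) h.pairwise]
    simp [h]
  · have hne : cs ≠ PySem.List.sorted cs (fun c => c) false := by
      intro he
      exact h (List.Pairwise.isChain (he ▸ PySem.List.sorted_pairwise cs (fun c => c)))
    simp [h, hne]

-- ===== VERDICT (by name: the statement is the Claim_ definition above) =====
theorem valid1_spec : Claim_equal_valid1 := by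
  intro passwd _
  unfold Spec_valid1 valid1 valid1_alt
  have h := valid1Loop_eq_pairLoop (PySem.Int.toChars passwd) 0 false
  simp only [Int.ofNat_zero, zero_add, List.drop_zero] at h
  rw [h, pairLoop_eq]
  simp only [sorted_eq_iff_chain, adjAny, PySem.List.slice_from_one, Bool.false_or]
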